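-- pv_equiv track=rewrite | github.com/danielcoblentz/Competitive-programming | 2023/2023Problem8.py | encypher
-- ===== SOURCE A (Python) =====
-- VOWELS = ['a', 'e', 'i', 'o', 'u']
--
-- VOWELS_UPPER = ['A', 'E', 'I', 'O', 'U']
--
-- CONSONANTS = ['b', 'c', 'd', 'f', 'g', 'h', 'j', 'k', 'l', 'm', 'n',
--               'p', 'q', 'r', 's', 't', 'v', 'w', 'x', 'y', 'z']
--
-- CONSONANTS_UPPER = ['B', 'C', 'D', 'F', 'G', 'H', 'J', 'K', 'L', 'M', 'N',
--                     'P', 'Q', 'R', 'S', 'T', 'V', 'W', 'X', 'Y', 'Z']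
--
-- def encypher(s):
--     new_s = ""
--
--     for c in s:
--         if c in VOWELS:
--             index = VOWELS.index(c)
--             new_s += VOWELS[(index + 1) % len(VOWELS)]
--         elif c in VOWELS_UPPER:
--             index = VOWELS_UPPER.index(c)
--             new_s += VOWELS_UPPER[(index + 1) % len(VOWELS_UPPER)]
--         elif c in CONSONANTS:
--             index = CONSONANTS.index(c)
--             new_s += CONSONANTS[(index + 1) % len(CONSONANTS)]
--         elif c in CONSONANTS_UPPER:
--             index = CONSONANTS_UPPER.index(c)
--             new_s += CONSONANTS_UPPER[(index + 1) % len(CONSONANTS_UPPER)]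
--         else:
--             new_s += c
--
--     return new_s
-- ===== SOURCE B (Python) =====
-- def encypher(s):
--     out = []
--     for c in s:
--         if c.isascii() and c.isalpha():
--             vowel = c.lower() in 'aeiou'
--             base = ord('A') if c.isupper() else ord('a')
--             j = (ord(c) - base + 1) % 26
--             while (chr(base + j) in 'aeiouAEIOU') != vowel:
--                 j = (j + 1) % 26
--             out.append(chr(base + j))
--         else:
--             out.append(c)
--     return ''.join(out)
-- ===== Notes on version B (the rewrite author's own statement) =====
-- stated objective: alternative
-- what changed: Replaces the four membership-and-index list scans with pure character arithmetic: step cyclically through the 26-letter alphabet from the next code point until the first letter of the same vowel/consonant class, correct because each group is alphabetically ordered.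
import Mathlib
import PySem

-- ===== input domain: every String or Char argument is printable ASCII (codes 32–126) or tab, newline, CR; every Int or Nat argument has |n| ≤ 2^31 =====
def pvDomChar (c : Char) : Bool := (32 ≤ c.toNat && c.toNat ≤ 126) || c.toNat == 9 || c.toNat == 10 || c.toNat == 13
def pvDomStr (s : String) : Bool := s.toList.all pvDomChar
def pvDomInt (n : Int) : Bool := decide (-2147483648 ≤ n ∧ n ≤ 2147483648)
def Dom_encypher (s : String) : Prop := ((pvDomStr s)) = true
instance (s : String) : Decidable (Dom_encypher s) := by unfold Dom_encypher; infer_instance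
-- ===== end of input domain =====

-- B drops the lists entirely: it steps cyclically through the alphabet by
-- character arithmetic to the next letter of the same vowel/consonant class
-- (correct since each group is alphabetically ordered); objective: alternative.

-- ===== PORT A =====
def aVowels : List Char := ['a', 'e', 'i', 'o', 'u']
def aVowelsUpper : List Char := ['A', 'E', 'I', 'O', 'U']
def aConsonants : List Char :=
  ['b', 'c', 'd', 'f', 'g', 'h', 'j', 'k', 'l', 'm', 'n',
   'p', 'q', 'r', 's', 't', 'v', 'w', 'x', 'y', 'z']
def aConsonantsUpper : List Char :=
  ['B', 'C', 'D', 'F', 'G', 'H', 'J', 'K', 'L', 'M', 'N',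
   'P', 'Q', 'R', 'S', 'T', 'V', 'W', 'X', 'Y', 'Z']

-- one loop iteration: the character appended to new_s for c
-- (list.index via PySem.List.index?; membership guarantees `some`, the
-- `.getD 0` is only a totality guard; GROUP[(index+1) % len] via pyGetD,
-- exact since the index is in range)
def aShift (group : List Char) (c : Char) : Char :=
  PySem.List.pyGetD group
    (PySem.Int.mod (((PySem.List.index? group c).getD 0 : Int) + 1) (group.length : Int)) c

def encypher (s : String) : String :=
  String.mk (s.toList.foldl (fun new_s c =>
    new_s ++ [if aVowels.contains c then aShift aVowels c
              else if aVowelsUpper.contains c then aShift aVowelsUpper c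
              else if aConsonants.contains c then aShift aConsonants c
              else if aConsonantsUpper.contains c then aShift aConsonantsUpper c
              else c]) [])

-- ===== PORT B =====
-- `chr(base + j) in 'aeiouAEIOU'`
def bIsVowelChar (c : Char) : Bool :=
  (['a','e','i','o','u','A','E','I','O','U'] : List Char).contains c

-- the while loop `while (chr(base+j) in 'aeiouAEIOU') != vowel: j = (j+1)%26`;
-- fuel 26 only makes it a total function (the loop stops within 26 steps)
def bScan (base : Nat) (vowel : Bool) : Nat → Nat → Nat
  | 0, j => j
  | fuel + 1, j =>
      if bIsVowelChar (Char.ofNat (base + j)) != vowel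
      then bScan base vowel fuel ((j + 1) % 26)
      else j

-- `c.isascii() and c.isalpha()` = ASCII letter (exact: range test on the code)
def bIsAsciiAlpha (c : Char) : Bool :=
  ('a'.toNat ≤ c.toNat && c.toNat ≤ 'z'.toNat) ||
  ('A'.toNat ≤ c.toNat && c.toNat ≤ 'Z'.toNat)

-- `c.isupper()` for an ASCII letter (exact there)
def bIsUpper (c : Char) : Bool := 'A'.toNat ≤ c.toNat && c.toNat ≤ 'Z'.toNat

def encypher_alt (s : String) : String :=
  String.mk (s.toList.foldl (fun out c =>
    out ++ [if bIsAsciiAlpha c then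
              let vowel := bIsVowelChar (Char.ofNat (c.toNat + 32 * (if bIsUpper c then 1 else 0)))
              -- `c.lower() in 'aeiou'`: lowercasing then testing the 10-letter
              -- string equals testing the 10-letter set directly; ported as the
              -- shared vowel test on the lowered code (exact for ASCII letters)
              let base := if bIsUpper c then 'A'.toNat else 'a'.toNat
              Char.ofNat (base + bScan base vowel 26 ((c.toNat - base + 1) % 26))
            else c]) [])

-- ===== PRECONDITION & SPEC =====
def Spec_encypher (s : String) (out : String) : Prop := out = encypher_alt s
instance (s : String) (out : String) : Decidable (Spec_encypher s out) := by unfold Spec_encypher; infer_instance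

-- ===== CLAIM =====
def Claim_equal_encypher : Prop := ∀ (s : String), Dom_encypher s → Spec_encypher s (encypher s)

-- ===== LEMMAS AND PROOFS =====

-- the character A appends for c
def aStep (c : Char) : Char :=
  if aVowels.contains c then aShift aVowels c
  else if aVowelsUpper.contains c then aShift aVowelsUpper c
  else if aConsonants.contains c then aShift aConsonants c
  else if aConsonantsUpper.contains c then aShift aConsonantsUpper c
  else c

-- the character B appends for c
def bStep (c : Char) : Char :=
  if bIsAsciiAlpha c then
    let vowel := bIsVowelChar (Char.ofNat (c.toNat + 32 * (if bIsUpper c then 1 else 0)))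
    let base := if bIsUpper c then 'A'.toNat else 'a'.toNat
    Char.ofNat (base + bScan base vowel 26 ((c.toNat - base + 1) % 26))
  else c

set_option maxRecDepth 8192 in
theorem aStep_eq_bStep_of_lt : ∀ n : Fin 128,
    aStep (Char.ofNat n.val) = bStep (Char.ofNat n.val) := by
  decide

theorem aStep_eq_bStep (c : Char) (h : pvDomChar c = true) :
    aStep c = bStep c := by
  have hlt : c.toNat < 128 := by
    simp [pvDomChar] at h
    omega
  have := aStep_eq_bStep_of_lt ⟨c.toNat, hlt⟩
  simpa [Char.ofNat_toNat] using this

theorem foldl_eq_of_dom (l : List Char) (h : ∀ c ∈ l, pvDomChar c = true) :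
    l.foldl (fun new_s c => new_s ++ [aStep c]) [] =
    l.foldl (fun out c => out ++ [bStep c]) [] := by
  induction l using List.reverseRecOn with
  | nil => rfl
  | append_singleton xs x ih =>
      simp only [List.foldl_append, List.foldl_cons, List.foldl_nil]
      rw [ih (fun c hc => h c (List.mem_append_left _ hc)),
          aStep_eq_bStep x (h x (List.mem_append_right _ (List.mem_singleton.mpr rfl)))]

-- ===== VERDICT =====
theorem encypher_spec : Claim_equal_encypher := by
  intro s hdom
  unfold Spec_encypher encypher encypher_alt
  congr 1
  have hdom' : ∀ c ∈ s.toList, pvDomChar c = true := by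
    simpa [Dom_encypher, pvDomStr, List.all_eq_true] using hdom
  simpa [aStep, bStep] using foldl_eq_of_dom s.toList hdom'
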